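-- pv_equiv track=rewrite | github.com/Pelleplutt/adventofcode | 2018/python/dec02.py | run_list
-- ===== SOURCE A (Python) =====
-- def run_list(data):
--     twos = 0
--     threes = 0
--     for s in data:
--         counts = {}
--         for c in s:
--             counts[c] = counts.get(c, 0) + 1
--
--         if 3 in counts.values():
--             threes += 1
--         if 2 in counts.values():
--             twos += 1
--
--     return twos * threes
-- ===== SOURCE B (Python) =====
-- def run_list(data):
--     twos = 0
--     threes = 0
--     for s in data:
--         lengths = set()
--         cs = sorted(s)
--         i = 0
--         n = len(cs)
--         while i < n:
--             j = i
--             while j < n and cs[j] == cs[i]: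
--                 j += 1
--             lengths.add(j - i)
--             i = j
--         if 3 in lengths:
--             threes += 1
--         if 2 in lengths:
--             twos += 1
--     return twos * threes
-- ===== Notes on version B (the rewrite author's own statement) =====
-- stated objective: alternative
-- what changed: Per string, B replaces A's hash-map character counting (dict of counts, then scanning its values) by sorting the string and scanning maximal runs of equal characters with two indices, collecting the set of run lengths.
import Mathlib
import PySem

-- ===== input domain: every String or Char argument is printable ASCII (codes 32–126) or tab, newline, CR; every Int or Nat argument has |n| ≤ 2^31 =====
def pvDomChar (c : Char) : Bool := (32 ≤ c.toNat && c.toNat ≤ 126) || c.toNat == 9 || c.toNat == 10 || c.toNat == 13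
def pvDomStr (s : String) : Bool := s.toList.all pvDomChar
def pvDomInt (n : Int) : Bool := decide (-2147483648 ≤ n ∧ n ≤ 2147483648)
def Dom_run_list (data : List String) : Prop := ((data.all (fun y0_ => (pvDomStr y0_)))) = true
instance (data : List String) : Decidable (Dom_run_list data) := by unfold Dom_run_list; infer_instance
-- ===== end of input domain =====

-- B replaces A's per-string hash-map character counting by a sort-then-scan of maximal runs
-- of equal characters (objective: alternative decomposition, similar cost).

-- ===== PORT A =====
def run_list (data : List String) : Int :=
  let p := data.foldl (fun (acc : Int × Int) s =>
    let counts := s.toList.foldl (fun (d : PySem.Dict Char Int) c =>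
      d.insert c (d.getD c 0 + 1)) PySem.Dict.empty
    let acc := if (3 : Int) ∈ counts.values then (acc.1, acc.2 + 1) else acc
    let acc := if (2 : Int) ∈ counts.values then (acc.1 + 1, acc.2) else acc
    acc) (0, 0)
  p.1 * p.2

-- ===== PORT B =====
-- run-length scan of Source B's inner while loops: each step consumes one maximal run
-- (j - i = length of the run of characters equal to cs[i])
def runLengths : List Char → List Nat
  | [] => []
  | c :: t => ((t.takeWhile (· == c)).length + 1) :: runLengths (t.dropWhile (· == c))
  termination_by l => l.length
  decreasing_by
    exact Nat.lt_succ_of_le (List.Sublist.length_le (List.dropWhile_sublist _))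

def run_list_alt (data : List String) : Int :=
  let p := data.foldl (fun (acc : Int × Int) s =>
    let lengths : PySem.Set Nat :=
      PySem.Set.ofList (runLengths (PySem.List.sorted s.toList (fun x => x) false))
    let acc := if 3 ∈ lengths then (acc.1, acc.2 + 1) else acc
    let acc := if 2 ∈ lengths then (acc.1 + 1, acc.2) else acc
    acc) (0, 0)
  p.1 * p.2

-- ===== PRECONDITION & SPEC =====
def Spec_run_list (data : List String) (out : Int) : Prop := out = run_list_alt data
instance (data : List String) (out : Int) : Decidable (Spec_run_list data out) := by unfold Spec_run_list; infer_instance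

-- ===== CLAIM (what is proved, stated in full; the proofs are below) =====
def Claim_equal_run_list : Prop := ∀ (data : List String), Dom_run_list data → Spec_run_list data (run_list data)

-- ===== LEMMAS AND PROOFS =====

-- In a ≤-sorted list, the first element's count is 1 + the length of the run after it,
-- and it no longer occurs after the run.
theorem count_head_sorted {c : Char} {t : List Char} (h : (c :: t).Pairwise (· ≤ ·)) :
    (c :: t).count c = (t.takeWhile (· == c)).length + 1 := by
  have hsplit := (List.takeWhile_append_dropWhile (p := (· == c)) (l := t)).symm
  have htake : ∀ x ∈ t.takeWhile (· == c), x = c := by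
    intro x hx
    have := List.mem_takeWhile_imp hx
    simpa using this
  have hdrop : (t.dropWhile (· == c)).count c = 0 := by
    rw [List.count_eq_zero]
    intro hc
    cases hd : t.dropWhile (· == c) with
    | nil => simp [hd] at hc
    | cons d r =>
      have hdne : ¬ (d == c) := by
        have := List.head?_dropWhile_not (p := (· == c)) (l := t)
        rw [hd] at this; simpa using this
      have hcle : c ≤ d := by
        have hdmem : d ∈ t := (List.dropWhile_sublist (p := (· == c)) (l := t)).mem (by simp [hd])
        exact (List.pairwise_cons.mp h).1 d hdmem
      have hpw : (d :: r).Pairwise (· ≤ ·) := by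
        rw [← hd]
        exact List.Pairwise.sublist (List.dropWhile_sublist _) ((List.pairwise_cons.mp h).2)
      rw [hd] at hc
      rcases List.mem_cons.mp hc with rfl | hc
      · exact hdne (by simp)
      · have : d ≤ c := (List.pairwise_cons.mp hpw).1 c hc
        have : d = c := le_antisymm this hcle
        exact hdne (by simp [this])
  have hct : t.count c = (t.takeWhile (· == c)).length := by
    conv_lhs => rw [hsplit]
    rw [List.count_append, hdrop, Nat.add_zero]
    rw [List.count_eq_length.mpr (by intro x hx; simpa using (htake x hx).symm)]
  simp [hct]

theorem count_ne_head_sorted {c x : Char} {t : List Char} (hx : x ≠ c) :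
    (c :: t).count x = (t.dropWhile (· == c)).count x := by
  have hsplit := (List.takeWhile_append_dropWhile (p := (· == c)) (l := t)).symm
  have htake : (t.takeWhile (· == c)).count x = 0 := by
    rw [List.count_eq_zero]
    intro hc
    exact hx (by simpa using List.mem_takeWhile_imp hc)
  have h1 : (c :: t).count x = t.count x := by
    simp [Ne.symm hx]
  rw [h1]
  conv_lhs => rw [hsplit]
  rw [List.count_append, htake, Nat.zero_add]

theorem mem_dropWhile_ne {c x : Char} {t : List Char} (h : (c :: t).Pairwise (· ≤ ·))
    (hx : x ∈ t.dropWhile (· == c)) : x ≠ c := by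
  intro heq
  rw [heq] at hx
  cases hd : t.dropWhile (· == c) with
  | nil => simp [hd] at hx
  | cons d r =>
    have hdne : ¬ (d == c) := by
      have := List.head?_dropWhile_not (p := (· == c)) (l := t)
      rw [hd] at this; simpa using this
    have hpw : (d :: r).Pairwise (· ≤ ·) := by
      rw [← hd]
      exact List.Pairwise.sublist (List.dropWhile_sublist _) ((List.pairwise_cons.mp h).2)
    have hdmem : d ∈ t := (List.dropWhile_sublist (p := (· == c)) (l := t)).mem (by simp [hd])
    have hcle : c ≤ d := (List.pairwise_cons.mp h).1 d hdmem
    rw [hd] at hx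
    rcases List.mem_cons.mp hx with rfl | hx
    · exact hdne (by simp)
    · have : d ≤ c := (List.pairwise_cons.mp hpw).1 c hx
      exact hdne (by simp [le_antisymm this hcle])

-- Characterisation of B's run lengths on a sorted list: exactly the counts of its members.
theorem runLengths_mem {l : List Char} (h : l.Pairwise (· ≤ ·)) (n : Nat) :
    n ∈ runLengths l ↔ ∃ c ∈ l, l.count c = n := by
  induction l using runLengths.induct with
  | case1 => simp [runLengths]
  | case2 c t ih =>
    have hpw : (t.dropWhile (· == c)).Pairwise (· ≤ ·) :=
      List.Pairwise.sublist (List.dropWhile_sublist _) ((List.pairwise_cons.mp h).2)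
    rw [runLengths]
    constructor
    · intro hm
      rcases List.mem_cons.mp hm with rfl | hm
      · exact ⟨c, List.mem_cons_self, count_head_sorted h⟩
      · rcases (ih hpw).mp hm with ⟨x, hxmem, hxcnt⟩
        have hxne := mem_dropWhile_ne h hxmem
        refine ⟨x, List.mem_cons_of_mem _ ((List.dropWhile_sublist _).mem hxmem), ?_⟩
        rw [count_ne_head_sorted hxne, hxcnt]
    · rintro ⟨x, hxmem, hxcnt⟩
      by_cases hx : x = c
      · subst hx
        rw [count_head_sorted h] at hxcnt
        exact List.mem_cons.mpr (Or.inl hxcnt.symm)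
      · have hxt : x ∈ t := by
          rcases List.mem_cons.mp hxmem with rfl | hxt
          · exact absurd rfl hx
          · exact hxt
        have hxdrop : x ∈ t.dropWhile (· == c) := by
          have hsplit := (List.takeWhile_append_dropWhile (p := (· == c)) (l := t)).symm
          rw [hsplit, List.mem_append] at hxt
          rcases hxt with hxin | hxin
          · exact absurd (by simpa using List.mem_takeWhile_imp hxin) hx
          · exact hxin
        refine List.mem_cons_of_mem _ ((ih hpw).mpr ⟨x, hxdrop, ?_⟩)
        rw [← count_ne_head_sorted hx, hxcnt]

-- Per-string bridge: A's "n in counts.values()" equals B's "n in run lengths of sorted(s)".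
theorem per_string (l : List Char) (n : Nat) :
    ((n : Int) ∈ (l.foldl (fun (d : PySem.Dict Char Int) c =>
        d.insert c (d.getD c 0 + 1)) PySem.Dict.empty).values
      ↔ n ∈ runLengths (PySem.List.sorted l (fun x => x) false)) := by
  have hA : (l.foldl (fun (d : PySem.Dict Char Int) c =>
      d.insert c (d.getD c 0 + 1)) PySem.Dict.empty) = PySem.Dict.counter l :=
    PySem.Dict.foldl_insert_getD_add_one_eq_counter l
  rw [hA]
  have hvals : (PySem.Dict.counter l).values
      = (PySem.Set.ofList l).map (fun k => (l.count k : Int)) := by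
    show ((PySem.Dict.counter l).items).map Prod.snd = _
    rw [PySem.Dict.items_counter]
    simp [List.map_map, Function.comp]
  rw [hvals]
  have hs := PySem.List.sorted_pairwise (xs := l) (key := fun x => x)
  rw [runLengths_mem hs n]
  constructor
  · intro hm
    rcases List.mem_map.mp hm with ⟨k, hk, hkeq⟩
    refine ⟨k, (PySem.List.mem_sorted _ _ _ _).mpr ((PySem.Set.mem_ofList _ _).mp hk), ?_⟩
    rw [List.Perm.count_eq (PySem.List.sorted_perm l _ _) k]
    exact_mod_cast hkeq
  · rintro ⟨c, hc, hcnt⟩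
    refine List.mem_map.mpr ⟨c, (PySem.Set.mem_ofList _ _).mpr ((PySem.List.mem_sorted _ _ _ _).mp hc), ?_⟩
    rw [List.Perm.count_eq (PySem.List.sorted_perm l _ _) c] at hcnt
    exact_mod_cast hcnt

-- ===== VERDICT (by name: the statement is the Claim_ definition above) =====
theorem run_list_spec : Claim_equal_run_list := by
  intro data hdom
  clear hdom
  unfold Spec_run_list run_list run_list_alt
  have hfold : ∀ (acc : Int × Int),
      data.foldl (fun (acc : Int × Int) s =>
        let counts := s.toList.foldl (fun (d : PySem.Dict Char Int) c =>
          d.insert c (d.getD c 0 + 1)) PySem.Dict.empty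
        let acc := if (3 : Int) ∈ counts.values then (acc.1, acc.2 + 1) else acc
        let acc := if (2 : Int) ∈ counts.values then (acc.1 + 1, acc.2) else acc
        acc) acc
      = data.foldl (fun (acc : Int × Int) s =>
        let lengths : PySem.Set Nat :=
          PySem.Set.ofList (runLengths (PySem.List.sorted s.toList (fun x => x) false))
        let acc := if 3 ∈ lengths then (acc.1, acc.2 + 1) else acc
        let acc := if 2 ∈ lengths then (acc.1 + 1, acc.2) else acc
        acc) acc := by
    induction data with
    | nil => intro acc; rfl
    | cons s rest ih =>
      intro acc
      simp only [List.foldl_cons]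
      rw [ih]
      congr 1
      have h3 : ((3 : Int) ∈ (s.toList.foldl (fun (d : PySem.Dict Char Int) c =>
            d.insert c (d.getD c 0 + 1)) PySem.Dict.empty).values)
          ↔ ((3 : Nat) ∈ (PySem.Set.ofList
            (runLengths (PySem.List.sorted s.toList (fun x => x) false)) : PySem.Set Nat)) :=
        (per_string s.toList 3).trans (PySem.Set.mem_ofList _ _).symm
      have h2 : ((2 : Int) ∈ (s.toList.foldl (fun (d : PySem.Dict Char Int) c =>
            d.insert c (d.getD c 0 + 1)) PySem.Dict.empty).values)
          ↔ ((2 : Nat) ∈ (PySem.Set.ofList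
            (runLengths (PySem.List.sorted s.toList (fun x => x) false)) : PySem.Set Nat)) :=
        (per_string s.toList 2).trans (PySem.Set.mem_ofList _ _).symm
      simp only [h3, h2]
  rw [hfold (0, 0)]
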